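-- pv_equiv track=rewrite | github.com/adamb314/ServoProject | Python/ServoProjectModules/CalibrationAnalyzers/SystemIdentification.py | findPwmChangeDelay
-- ===== SOURCE A (Python) =====
-- def findPwmChangeDelay(pwmData):
--     lastPwm = pwmData[2]
--     constPwmSamples = []
--     nrOfConstPwm = 0
--     for pwm in pwmData:
--         if lastPwm == pwm:
--             nrOfConstPwm += 1
--         else:
--             constPwmSamples.append(nrOfConstPwm)
--             nrOfConstPwm = 0
--         lastPwm = pwm
--
--     constPwmSamples = sorted(constPwmSamples)
--     return constPwmSamples[len(constPwmSamples) // 20]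
-- ===== SOURCE B (Python) =====
-- def findPwmChangeDelay(pwmData):
--     # Histogram selection: one pass builds a run-length histogram, then the
--     # k-th smallest sample (k = nSamples // 20) is found by walking the
--     # (few) distinct run lengths in increasing order -- no sort of the
--     # full sample list.
--     lastPwm = pwmData[2]
--     counts = {}
--     nSamples = 0
--     run = 0
--     for pwm in pwmData:
--         if lastPwm == pwm:
--             run += 1
--         else:
--             counts[run] = counts.get(run, 0) + 1
--             nSamples += 1
--             run = 0
--         lastPwm = pwm
--     k = nSamples // 20
--     for v in sorted(counts):
--         if k < counts[v]:
--             return v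
--         k -= counts[v]
-- ===== Notes on version B (the rewrite author's own statement) =====
-- stated objective: alternative
-- what changed: B replaces A's collect-all-run-lengths-then-sort-then-index by a one-pass histogram (dict) of run lengths plus a rank scan over the sorted distinct lengths, so only the distinct run lengths are ever sorted.
import Mathlib
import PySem

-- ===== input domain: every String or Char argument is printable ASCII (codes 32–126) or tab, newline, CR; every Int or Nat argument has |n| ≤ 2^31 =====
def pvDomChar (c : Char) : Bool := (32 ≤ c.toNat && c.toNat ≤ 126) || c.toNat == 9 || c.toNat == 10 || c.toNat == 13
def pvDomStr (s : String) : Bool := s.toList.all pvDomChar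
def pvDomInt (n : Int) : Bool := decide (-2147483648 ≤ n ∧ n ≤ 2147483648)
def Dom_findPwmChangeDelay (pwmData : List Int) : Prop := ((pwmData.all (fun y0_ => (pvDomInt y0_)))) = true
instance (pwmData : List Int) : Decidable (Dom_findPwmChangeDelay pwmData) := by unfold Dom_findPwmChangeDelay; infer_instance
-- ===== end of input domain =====

-- B replaces "collect all run lengths, sort them, index" by "histogram of run
-- lengths in one pass, then rank-scan the sorted distinct lengths" (alternative
-- algorithm, same result).

-- ===== PORT A =====
-- loop body of A: state (lastPwm, constPwmSamples, nrOfConstPwm)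
def pvStepA (st : Int × List Int × Int) (pwm : Int) : Int × List Int × Int :=
  if st.1 == pwm then (pwm, st.2.1, st.2.2 + 1) else (pwm, st.2.1 ++ [st.2.2], 0)

def findPwmChangeDelay (pwmData : List Int) : Int :=
  -- pwmData[2]: IndexError when the list is shorter than 3 — excluded by Pre_
  let lastPwm := (PySem.List.pyGet? pwmData 2).getD 0
  let st := pwmData.foldl pvStepA (lastPwm, [], 0)
  let sortedSamples := PySem.List.sorted st.2.1 (fun v => v) false
  -- constPwmSamples[len//20]: IndexError when no sample was collected — excluded by Pre_
  (PySem.List.pyGet? sortedSamples (PySem.Int.floordiv (PySem.List.len sortedSamples) 20)).getD 0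

-- ===== PORT B =====
-- loop body of B: state (lastPwm, counts, nSamples, run)
def pvStepB (st : Int × PySem.Dict Int Int × Int × Int) (pwm : Int) : Int × PySem.Dict Int Int × Int × Int :=
  if st.1 == pwm then (pwm, st.2.1, st.2.2.1, st.2.2.2 + 1)
  else (pwm, st.2.1.insert st.2.2.2 (st.2.1.getD st.2.2.2 0 + 1), st.2.2.1 + 1, 0)

-- 'for v in sorted(counts): if k < counts[v]: return v; k -= counts[v]'
-- (falling off the loop returns None in Python — excluded by Pre_; 0 here)
def pvScanB (d : PySem.Dict Int Int) (keys : List Int) (k : Int) : Int :=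
  match keys with
  | [] => 0
  | v :: rest => if k < d.getD v 0 then v else pvScanB d rest (k - d.getD v 0)

def findPwmChangeDelay_alt (pwmData : List Int) : Int :=
  let lastPwm := (PySem.List.pyGet? pwmData 2).getD 0
  let st := pwmData.foldl pvStepB (lastPwm, PySem.Dict.empty, 0, 0)
  pvScanB st.2.1 (PySem.List.sorted st.2.1.keys (fun v => v) false)
    (PySem.Int.floordiv st.2.2.1 20)

-- ===== PRECONDITION & SPEC =====
-- Pre_ excludes exactly the inputs where A raises: lists shorter than 3
-- (IndexError on pwmData[2]) and lists whose elements are all equal, where no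
-- run ever ends and constPwmSamples[0] is an IndexError on the empty list.
def Pre_findPwmChangeDelay (pwmData : List Int) : Prop :=
  3 ≤ pwmData.length ∧ ∃ x ∈ pwmData, x ≠ pwmData.headI
instance (pwmData : List Int) : Decidable (Pre_findPwmChangeDelay pwmData) := by
  unfold Pre_findPwmChangeDelay; infer_instance

def pvWitness_findPwmChangeDelay : List Int := [0, 1, 0, 1]

def Spec_findPwmChangeDelay (pwmData : List Int) (out : Int) : Prop := out = findPwmChangeDelay_alt pwmData
instance (pwmData : List Int) (out : Int) : Decidable (Spec_findPwmChangeDelay pwmData out) := by unfold Spec_findPwmChangeDelay; infer_instance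

-- ===== CLAIM (what is proved, stated in full; the proofs are below) =====
def Claim_equal_findPwmChangeDelay : Prop := ∀ (pwmData : List Int), Dom_findPwmChangeDelay pwmData → Pre_findPwmChangeDelay pwmData → Spec_findPwmChangeDelay pwmData (findPwmChangeDelay pwmData)

-- ===== LEMMAS AND PROOFS =====

-- the insert-form counter B's loop maintains
def pvCounterI (xs : List Int) : PySem.Dict Int Int :=
  xs.foldl (fun d x => d.insert x (d.getD x 0 + 1)) PySem.Dict.empty

-- pairing the two loops: B's state mirrors A's
theorem pv_fold_pair (l : List Int) (last run : Int) (acc : List Int) :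
    l.foldl pvStepB (last, pvCounterI acc, (acc.length : Int), run)
      = ((l.foldl pvStepA (last, acc, run)).1,
         pvCounterI (l.foldl pvStepA (last, acc, run)).2.1,
         ((l.foldl pvStepA (last, acc, run)).2.1.length : Int),
         (l.foldl pvStepA (last, acc, run)).2.2) := by
  induction l generalizing last run acc with
  | nil => rfl
  | cons x xs ih =>
    by_cases h : last = x
    · simp only [List.foldl_cons, pvStepA, pvStepB, h, beq_self_eq_true, if_true]
      exact ih x (run + 1) acc
    · have h' : (last == x) = false := beq_eq_false_iff_ne.mpr h
      simp only [List.foldl_cons, pvStepA, pvStepB, h', Bool.false_eq_true, if_false]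
      have e1 : (pvCounterI acc).insert run ((pvCounterI acc).getD run 0 + 1)
          = pvCounterI (acc ++ [run]) := by
        simp [pvCounterI, List.foldl_append]
      have e2 : ((acc.length : Int) + 1) = (((acc ++ [run]).length : Int)) := by
        simp
      rw [e1, e2]
      exact ih x 0 (acc ++ [run])

-- A's accumulator never shrinks
theorem pv_fold_len_mono (l : List Int) (last run : Int) (acc : List Int) :
    acc.length ≤ (l.foldl pvStepA (last, acc, run)).2.1.length := by
  induction l generalizing last run acc with
  | nil => exact le_rfl
  | cons x xs ih =>
    by_cases h : last = x
    · simp only [List.foldl_cons, pvStepA, h, beq_self_eq_true, if_true]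
      exact ih x (run + 1) acc
    · have h' : (last == x) = false := beq_eq_false_iff_ne.mpr h
      simp only [List.foldl_cons, pvStepA, h', Bool.false_eq_true, if_false]
      have := ih x 0 (acc ++ [run])
      simp only [List.length_append, List.length_cons, List.length_nil] at this
      omega

-- if A's loop never appends, every element equals the running lastPwm
theorem pv_fold_const (l : List Int) (last run : Int) (acc : List Int)
    (h : (l.foldl pvStepA (last, acc, run)).2.1 = acc) : ∀ x ∈ l, x = last := by
  induction l generalizing last run acc with
  | nil => intro x hx; cases hx
  | cons x xs ih =>
    by_cases hx : last = x
    · simp only [List.foldl_cons, pvStepA, hx, beq_self_eq_true, if_true] at h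
      intro y hy
      rcases List.mem_cons.mp hy with rfl | hy'
      · exact hx.symm ▸ rfl
      · exact (ih x (run + 1) acc h y hy').trans hx.symm
    · exfalso
      have h' : (last == x) = false := beq_eq_false_iff_ne.mpr hx
      simp only [List.foldl_cons, pvStepA, h', Bool.false_eq_true, if_false] at h
      have hm := pv_fold_len_mono xs x 0 (acc ++ [run])
      rw [h] at hm
      simp only [List.length_append, List.length_cons, List.length_nil] at hm
      omega

-- counting in a flatMap of replicate-blocks over nodup keys
theorem pv_count_flatMap (keys : List Int) (f : Int → Nat) (hnd : keys.Nodup) (a : Int) :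
    (keys.flatMap (fun v => List.replicate (f v) v)).count a = if a ∈ keys then f a else 0 := by
  induction keys with
  | nil => simp
  | cons v rest ih =>
    have hnd' := (List.nodup_cons.mp hnd)
    rw [List.flatMap_cons, List.count_append, List.count_replicate,
      ih hnd'.2]
    by_cases hav : a = v
    · subst hav
      have : a ∉ rest := hnd'.1
      simp [this]
    · simp [hav, Ne.symm hav, List.mem_cons]

-- blocks over strictly increasing keys are sorted
theorem pv_pairwise_flatMap (keys : List Int) (f : Int → Nat)
    (h : keys.Pairwise (· < ·)) :
    (keys.flatMap (fun v => List.replicate (f v) v)).Pairwise (· ≤ ·) := by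
  induction keys with
  | nil => simp
  | cons v rest ih =>
    have h' := (List.pairwise_cons.mp h)
    rw [List.flatMap_cons]
    refine List.pairwise_append.mpr ⟨?_, ih h'.2, ?_⟩
    · exact List.pairwise_replicate.mpr (Or.inr le_rfl)
    · intro x hx y hy
      have hxv : x = v := List.eq_of_mem_replicate hx
      rcases List.mem_flatMap.mp hy with ⟨u, hu, hyu⟩
      have hyu' : y = u := List.eq_of_mem_replicate hyu
      rw [hxv, hyu']
      exact le_of_lt (h'.1 u hu)

-- sorted(s) is the blocks of sorted(set(s))
theorem pv_sorted_eq_flatMap (s : List Int) :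
    PySem.List.sorted s (fun v => v) false
      = (PySem.List.sorted (PySem.Set.ofList s) (fun v => v) false).flatMap
          (fun v => List.replicate (s.count v) v) := by
  have hperm : ((PySem.List.sorted (PySem.Set.ofList s) (fun v => v) false).flatMap
      (fun v => List.replicate (s.count v) v)).Perm s := by
    apply List.perm_iff_count.mpr
    intro a
    have hnd : (PySem.List.sorted (PySem.Set.ofList s) (fun v => v) false).Nodup :=
      (PySem.List.sorted_perm (PySem.Set.ofList s) (fun v => v) false).symm.nodup
        (PySem.Set.nodup_ofList s)
    rw [pv_count_flatMap _ _ hnd a]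
    by_cases ha : a ∈ s
    · have : a ∈ PySem.List.sorted (PySem.Set.ofList s) (fun v => v) false := by
        rw [PySem.List.mem_sorted, PySem.Set.mem_ofList]; exact ha
      simp [this]
    · have : a ∉ PySem.List.sorted (PySem.Set.ofList s) (fun v => v) false := by
        rw [PySem.List.mem_sorted, PySem.Set.mem_ofList]; exact ha
      simp [this, List.count_eq_zero_of_not_mem ha]
  apply PySem.List.sorted_id_eq_of_perm_of_pairwise
  · exact hperm
  · exact pv_pairwise_flatMap _ _ (PySem.List.sorted_ofList_pairwise_lt s)

-- the rank scan reads off the k-th element of the block list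
theorem pv_scan_eq_get (d : PySem.Dict Int Int) (s : List Int)
    (hd : ∀ v, d.getD v 0 = (s.count v : Int)) (keys : List Int) (k : Int) (hk : 0 ≤ k)
    (h : k.toNat < (keys.flatMap (fun v => List.replicate (s.count v) v)).length) :
    pvScanB d keys k
      = (keys.flatMap (fun v => List.replicate (s.count v) v))[k.toNat]'h := by
  induction keys generalizing k with
  | nil => simp at h
  | cons v rest ih =>
    have h' : k.toNat < (List.replicate (s.count v) v
        ++ rest.flatMap (fun v => List.replicate (s.count v) v)).length := by
      simpa [List.flatMap_cons] using h
    rw [eq_comm, List.getElem_eq_iff]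
    simp only [List.flatMap_cons, pvScanB, hd v]
    by_cases hk' : k < (s.count v : Int)
    · rw [if_pos hk',
        List.getElem?_append_left (by simp only [List.length_replicate]; omega),
        List.getElem?_replicate, if_pos (by omega)]
    · have h2 : (k - (s.count v : Int)).toNat
          < (rest.flatMap (fun v => List.replicate (s.count v) v)).length := by
        simp only [List.length_append, List.length_replicate] at h'
        omega
      rw [if_neg hk',
        List.getElem?_append_right (by simp only [List.length_replicate]; omega),
        List.length_replicate]
      have e : k.toNat - s.count v = (k - (s.count v : Int)).toNat := by omega
      rw [e, List.getElem?_eq_getElem h2, ih (k - (s.count v : Int)) (by omega) h2]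

-- ===== VERDICT (by name: the statement is the Claim_ definition above) =====
theorem findPwmChangeDelay_spec : Claim_equal_findPwmChangeDelay := by
  intro pwmData _ hpre
  obtain ⟨hlen3, x, hxmem, hxne⟩ := hpre
  simp only [Spec_findPwmChangeDelay, findPwmChangeDelay, findPwmChangeDelay_alt,
    PySem.List.len_eq]
  set last := (PySem.List.pyGet? pwmData 2).getD 0 with hlast
  set stA := pwmData.foldl pvStepA (last, [], 0) with hstA
  set s := stA.2.1 with hs
  have hpair : pwmData.foldl pvStepB (last, PySem.Dict.empty, 0, 0)
      = (stA.1, pvCounterI s, (s.length : Int), stA.2.2) :=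
    pv_fold_pair pwmData last 0 []
  have hne : pwmData ≠ [] := by
    intro h; rw [h] at hlen3; simp at hlen3
  have hsne : s ≠ [] := by
    intro h0
    have hall := pv_fold_const pwmData last 0 [] (by rw [← hstA]; exact h0)
    have hheadmem : pwmData.headI ∈ pwmData := by
      cases pwmData with
      | nil => exact absurd rfl hne
      | cons a t => exact List.mem_cons_self
    have hhead := hall _ hheadmem
    have hx := hall _ hxmem
    exact hxne (hx.trans hhead.symm)
  have hm : 0 < s.length := by
    cases hc : s with
    | nil => exact absurd hc hsne
    | cons a t => simp
  have hcnt : pvCounterI s = PySem.Dict.counter s :=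
    PySem.Dict.foldl_insert_getD_add_one_eq_counter s
  have hd : ∀ v : Int, (pvCounterI s).getD v 0 = (s.count v : Int) := by
    intro v
    rw [hcnt]
    simp [PySem.Dict.getD_counter]
  have hkeys : (pvCounterI s).keys = PySem.Set.ofList s := by
    rw [hcnt]
    simp [PySem.Dict.keys_counter]
  have hflat := pv_sorted_eq_flatMap s
  have hlens : (PySem.List.sorted s (fun v => v) false).length = s.length :=
    PySem.List.length_sorted s (fun v => v) false
  have hflen : ((PySem.List.sorted (PySem.Set.ofList s) (fun v => v) false).flatMap
      (fun v => List.replicate (s.count v) v)).length = s.length := by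
    rw [← hflat]; exact hlens
  set K : Nat := s.length / 20 with hK
  have hKlt : K < s.length := by omega
  have hfd : PySem.Int.floordiv ((s.length : Int)) 20 = ((K : Nat) : Int) := by
    have := PySem.Int.floordiv_natCast s.length 20
    exact_mod_cast this
  rw [hpair, hkeys, hflat, hflen, hfd]
  have hB := pv_scan_eq_get (pvCounterI s) s hd
    (PySem.List.sorted (PySem.Set.ofList s) (fun v => v) false) ((K : Nat) : Int)
    (Int.natCast_nonneg K)
    (by simp only [Int.toNat_natCast]; rw [hflen]; exact hKlt)
  rw [hB, PySem.List.pyGet?_natCast, List.getElem?_eq_getElem (by rw [hflen]; exact hKlt)]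
  simp
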